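-- pv_equiv track=rewrite | github.com/aazizbau/math_course_dlcv | days/day14/code/receptive_field.py | compute_rf
-- ===== SOURCE A (Python) =====
-- from typing import Iterable, List, Tuple
--
-- LayerSpec = Tuple[int, int]  # (kernel_size, stride)
--
-- def compute_rf(layers: Iterable[LayerSpec]) -> List[int]:
--     """Return receptive-field history given (kernel, stride) pairs."""
--     rf = 1
--     jump = 1
--     history = [rf]
--     for k, s in layers:
--         rf = rf + (k - 1) * jump
--         jump *= s
--         history.append(rf)
--     return history
-- ===== SOURCE B (Python) =====
-- from typing import Iterable, List, Tuple
--
-- LayerSpec = Tuple[int, int]  # (kernel_size, stride)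
--
-- def compute_rf(layers: Iterable[LayerSpec]) -> List[int]:
--     """Return receptive-field history given (kernel, stride) pairs.
--
--     Brute force: each history entry is recomputed independently from its
--     closed form rf(i) = 1 + sum_{j<i} (k_j - 1) * prod_{m<j} s_m.
--     """
--     layers = list(layers)
--
--     def jump_before(j: int) -> int:
--         jump = 1
--         for m in range(j):
--             jump *= layers[m][1]
--         return jump
--
--     def rf_at(i: int) -> int:
--         total = 1
--         for j in range(i):
--             total += (layers[j][0] - 1) * jump_before(j)
--         return total
--
--     return [rf_at(i) for i in range(len(layers) + 1)]
-- ===== Notes on version B (the rewrite author's own statement) =====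
-- stated objective: alternative
-- what changed: Instead of threading rf and jump accumulators through one loop, B computes each history entry independently from the closed form rf(i) = 1 + sum_{j<i}(k_j-1)*prod_{m<j}s_m with nested loops (no state carried between entries).
import Mathlib
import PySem

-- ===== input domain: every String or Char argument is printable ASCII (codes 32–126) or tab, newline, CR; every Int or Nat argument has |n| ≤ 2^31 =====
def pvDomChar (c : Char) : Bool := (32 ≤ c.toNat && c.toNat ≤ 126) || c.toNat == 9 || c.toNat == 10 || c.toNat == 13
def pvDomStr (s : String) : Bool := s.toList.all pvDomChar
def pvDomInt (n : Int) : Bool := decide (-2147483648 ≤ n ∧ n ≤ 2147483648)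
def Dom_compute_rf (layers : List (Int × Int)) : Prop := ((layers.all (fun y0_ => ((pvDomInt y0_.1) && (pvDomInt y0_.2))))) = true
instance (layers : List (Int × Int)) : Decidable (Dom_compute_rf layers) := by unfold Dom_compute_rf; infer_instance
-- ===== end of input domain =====

-- B recomputes each history entry independently from its closed form (nested index loops), instead of A's stateful single pass; an alternative decomposition, not faster.


-- ===== PORT A =====
-- A threads rf and jump through one loop, appending each new rf to history.
def compute_rf_go (layers : List (Int × Int)) (rf jump : Int) (history : List Int) : List Int :=
  match layers with
  | [] => history
  | (k, s) :: rest =>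
      compute_rf_go rest (rf + (k - 1) * jump) (jump * s) (history ++ [rf + (k - 1) * jump])

def compute_rf (layers : List (Int × Int)) : List Int :=
  compute_rf_go layers 1 1 [1]

-- ===== PORT B =====
-- B recomputes every history entry independently from its closed form (nested index loops).
def pvJumpBefore (layers : List (Int × Int)) (j : Nat) : Int :=
  (List.range j).foldl (fun jump m => jump * (layers.getD m (0, 0)).2) 1

def pvRfAt (layers : List (Int × Int)) (i : Nat) : Int :=
  (List.range i).foldl (fun total j => total + ((layers.getD j (0, 0)).1 - 1) * pvJumpBefore layers j) 1

def compute_rf_alt (layers : List (Int × Int)) : List Int :=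
  (List.range (layers.length + 1)).map (pvRfAt layers)

-- ===== PRECONDITION & SPEC =====
def Spec_compute_rf (layers : List (Int × Int)) (out : List Int) : Prop := out = compute_rf_alt layers
instance (layers : List (Int × Int)) (out : List Int) : Decidable (Spec_compute_rf layers out) := by unfold Spec_compute_rf; infer_instance

-- ===== CLAIM (what is proved, stated in full; the proofs are below) =====
def Claim_equal_compute_rf : Prop := ∀ (layers : List (Int × Int)), Dom_compute_rf layers → Spec_compute_rf layers (compute_rf layers)

-- ===== LEMMAS AND PROOFS =====

lemma pvJumpBefore_succ (L : List (Int × Int)) (j : Nat) :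
    pvJumpBefore L (j + 1) = pvJumpBefore L j * (L.getD j (0, 0)).2 := by
  simp [pvJumpBefore, List.range_succ]

lemma pvRfAt_succ (L : List (Int × Int)) (i : Nat) :
    pvRfAt L (i + 1) = pvRfAt L i + ((L.getD i (0, 0)).1 - 1) * pvJumpBefore L i := by
  simp [pvRfAt, List.range_succ]

lemma compute_rf_go_key (L : List (Int × Int)) : ∀ i, i ≤ L.length →
    compute_rf_go (L.drop i) (pvRfAt L i) (pvJumpBefore L i) ((List.range (i + 1)).map (pvRfAt L))
      = (List.range (L.length + 1)).map (pvRfAt L) := by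
  intro i h
  obtain ⟨d, hd⟩ := Nat.exists_eq_add_of_le h
  clear h
  induction d generalizing i with
  | zero => simp_all [compute_rf_go, List.drop_of_length_le]
  | succ d ih =>
      have hi : i < L.length := by omega
      have hdrop : L.drop i = L[i] :: L.drop (i + 1) :=
        List.drop_eq_getElem_cons hi
      rw [hdrop]
      rcases hL : L[i] with ⟨k, s⟩
      have hks : L.getD i (0, 0) = (k, s) := by
        rw [List.getD_eq_getElem?_getD, List.getElem?_eq_getElem hi, hL]; rfl
      simp only [compute_rf_go]
      have h1 : pvRfAt L i + (k - 1) * pvJumpBefore L i = pvRfAt L (i + 1) := by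
        rw [pvRfAt_succ, hks]
      have h2 : pvJumpBefore L i * s = pvJumpBefore L (i + 1) := by
        rw [pvJumpBefore_succ, hks]
      have h3 : (List.range (i + 1)).map (pvRfAt L) ++ [pvRfAt L i + (k - 1) * pvJumpBefore L i]
          = (List.range (i + 2)).map (pvRfAt L) := by
        rw [h1]
        simp [List.range_succ]
      rw [h3, h1, h2]
      exact ih (i + 1) (by omega)

-- ===== VERDICT (by name: the statement is the Claim_ definition above) =====
theorem compute_rf_spec : Claim_equal_compute_rf := by
  intro layers _
  unfold Spec_compute_rf compute_rf compute_rf_alt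
  have := compute_rf_go_key layers 0 (by omega)
  simpa [pvRfAt, pvJumpBefore] using this
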